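-- pv_equiv track=rewrite | github.com/acabr017/AdventOfCode2023 | day3_part2.py | element_finder
-- ===== SOURCE A (Python) =====
-- def element_finder(line):
--     numbers = {}
--     symbols = {}
--     coords = []
--     current_number = ""
--     for i, char in enumerate(line.strip()):
--         if char.isdigit():
--             current_number += char
--             coords.append(i)
--             if i == len(line.strip()) - 1:
--                 try:
--                     numbers[current_number].append(coords)
--                 except KeyError:
--                     numbers[current_number] = []
--                     numbers[current_number].append(coords)
--         elif char.isdigit() is False and len(current_number) != 0:
--             try:
--                 numbers[current_number].append(coords)
--             except KeyError:
--                 numbers[current_number] = []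
--                 numbers[current_number].append(coords)
--             current_number = ""
--             coords = []
--         if char in master_symbols:
--             try:
--                 symbols[char].append(i)
--             except KeyError:
--                 symbols[char] = [i]
--
--     return numbers, symbols
--
-- master_symbols = ["*"]
-- ===== SOURCE B (Python) =====
-- from itertools import groupby
--
-- master_symbols = ["*"]
--
-- def element_finder(line):
--     s = line.strip()
--     numbers = {}
--     symbols = {}
--     for is_digit, group in groupby(enumerate(s), key=lambda p: p[1].isdigit()):
--         if is_digit:
--             run = list(group)
--             num = "".join(ch for _, ch in run)
--             numbers.setdefault(num, []).append([i for i, _ in run])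
--     for i, ch in enumerate(s):
--         if ch in master_symbols:
--             symbols.setdefault(ch, []).append(i)
--     return numbers, symbols
-- ===== Notes on version B (the rewrite author's own statement) =====
-- stated objective: idiomatic
-- what changed: A's single char-by-char state machine (accumulator string, coords buffer, end-of-line flush special case) is replaced by a groupby-style split of the stripped line into maximal digit runs recorded via setdefault, plus a separate simple scan for symbol positions.
import Mathlib
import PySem

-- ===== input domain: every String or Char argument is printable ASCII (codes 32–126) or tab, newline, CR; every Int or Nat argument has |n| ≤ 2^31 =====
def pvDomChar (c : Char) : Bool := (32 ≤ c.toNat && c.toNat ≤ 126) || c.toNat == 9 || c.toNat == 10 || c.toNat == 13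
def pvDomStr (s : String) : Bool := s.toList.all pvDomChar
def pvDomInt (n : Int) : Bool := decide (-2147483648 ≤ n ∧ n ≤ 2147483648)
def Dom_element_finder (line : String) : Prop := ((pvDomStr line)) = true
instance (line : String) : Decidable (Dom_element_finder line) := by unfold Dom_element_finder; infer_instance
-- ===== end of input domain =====

-- B replaces A's char-by-char accumulator state machine by a run-splitting (groupby) pass for the
-- numbers plus a separate simple scan for the symbols (objective: idiomatic decomposition).

-- ===== PORT A =====
-- module-level constant from the Python file
def master_symbols : List String := ["*"]

-- numbers[k].append(v) with A's try/except KeyError pattern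
def aAdd (d : PySem.Dict String (List (List Int))) (k : String) (v : List Int) :
    PySem.Dict String (List (List Int)) :=
  match d.get? k with
  | some _ => d.modify k [] (· ++ [v])
  | none => (d.insert k []).modify k [] (· ++ [v])

-- loop body of A: state = (numbers, symbols, coords, current_number); L = len(line.strip()) - 1
def afStep (L : Int)
    (st : PySem.Dict String (List (List Int)) × PySem.Dict String (List Int) × List Int × List Char)
    (p : Int × Char) :
    PySem.Dict String (List (List Int)) × PySem.Dict String (List Int) × List Int × List Char :=
  match st, p with
  | (numbers, symbols, coords, cur), (i, c) =>
    let (numbers, coords, cur) :=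
      if PySem.Chars.isdigit c then
        let cur := cur ++ [c]
        let coords := coords ++ [i]
        if i = L then (aAdd numbers (String.ofList cur) coords, coords, cur)
        else (numbers, coords, cur)
      else if cur.length ≠ 0 then
        (aAdd numbers (String.ofList cur) coords, ([] : List Int), ([] : List Char))
      else (numbers, coords, cur)
    let symbols :=
      if master_symbols.contains (String.ofList [c]) then
        match symbols.get? (String.ofList [c]) with
        | some _ => symbols.modify (String.ofList [c]) [] (· ++ [i])
        | none => symbols.insert (String.ofList [c]) [i]
      else symbols
    (numbers, symbols, coords, cur)

def element_finder (line : String) : (List (String × List (List Int))) × (List (String × List Int)) :=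
  let s := PySem.Chars.strip line.toList
  let st := (PySem.List.enumerate s).foldl (afStep (PySem.List.len s - 1))
      (PySem.Dict.empty, PySem.Dict.empty, [], [])
  (st.1.items, st.2.1.items)

-- ===== PORT B =====
-- groupby(enumerate(s), key=digit?): consume each maximal digit run, record it with setdefault+append
def bNums (nums : PySem.Dict String (List (List Int))) (pairs : List (Int × Char)) :
    PySem.Dict String (List (List Int)) :=
  match pairs with
  | [] => nums
  | (i, c) :: rest =>
    if PySem.Chars.isdigit c then
      let run := (i, c) :: rest.takeWhile (fun q => PySem.Chars.isdigit q.2)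
      bNums (nums.modify (String.ofList (run.map (·.2))) [] (· ++ [run.map (·.1)]))
        (rest.dropWhile (fun q => PySem.Chars.isdigit q.2))
    else bNums nums rest
termination_by pairs.length
decreasing_by
  · exact Nat.lt_succ_of_le (List.length_dropWhile_le _ _)
  · simp

-- second scan: symbols.setdefault(ch, []).append(i)
def bSymStep (d : PySem.Dict String (List Int)) (p : Int × Char) : PySem.Dict String (List Int) :=
  if master_symbols.contains (String.ofList [p.2]) then d.modify (String.ofList [p.2]) [] (· ++ [p.1]) else d

def element_finder_alt (line : String) : (List (String × List (List Int))) × (List (String × List Int)) :=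
  let s := PySem.Chars.strip line.toList
  let e := PySem.List.enumerate s
  ((bNums PySem.Dict.empty e).items, (e.foldl bSymStep PySem.Dict.empty).items)

-- ===== PRECONDITION & SPEC =====
def Spec_element_finder (line : String) (out : (List (String × List (List Int))) × (List (String × List Int))) : Prop := out = element_finder_alt line
instance (line : String) (out : (List (String × List (List Int))) × (List (String × List Int))) : Decidable (Spec_element_finder line out) := by unfold Spec_element_finder; infer_instance

-- ===== CLAIM (what is proved, stated in full; the proofs are below) =====
def Claim_equal_element_finder : Prop := ∀ (line : String), Dom_element_finder line → Spec_element_finder line (element_finder line)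

-- ===== LEMMAS AND PROOFS =====

-- the numbers component of A's loop body, in isolation
def numStep (L : Int)
    (st : PySem.Dict String (List (List Int)) × List Int × List Char) (p : Int × Char) :
    PySem.Dict String (List (List Int)) × List Int × List Char :=
  match st, p with
  | (numbers, coords, cur), (i, c) =>
    if PySem.Chars.isdigit c then
      let cur := cur ++ [c]
      let coords := coords ++ [i]
      if i = L then (aAdd numbers (String.ofList cur) coords, coords, cur)
      else (numbers, coords, cur)
    else if cur.length ≠ 0 then
      (aAdd numbers (String.ofList cur) coords, ([] : List Int), ([] : List Char))
    else (numbers, coords, cur)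

-- the symbols component of A's loop body, in isolation
def symStep (d : PySem.Dict String (List Int)) (p : Int × Char) : PySem.Dict String (List Int) :=
  if master_symbols.contains (String.ofList [p.2]) then
    match d.get? (String.ofList [p.2]) with
    | some _ => d.modify (String.ofList [p.2]) [] (· ++ [p.1])
    | none => d.insert (String.ofList [p.2]) [p.1]
  else d

-- "only the last index equals L": the shape of enumerate's index list that A's end-of-line flush needs
def HL (L : Int) : List (Int × Char) → Prop
  | [] => True
  | [p] => p.1 = L
  | p :: q :: rest => p.1 ≠ L ∧ HL L (q :: rest)

theorem afStep_split (L : Int) (n : PySem.Dict String (List (List Int)))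
    (s : PySem.Dict String (List Int)) (c : List Int) (u : List Char) (p : Int × Char) :
    afStep L (n, s, c, u) p = ((numStep L (n, c, u) p).1, symStep s p, (numStep L (n, c, u) p).2) := by
  obtain ⟨i, ch⟩ := p
  simp only [afStep, numStep, symStep]

theorem foldl_afStep_split (L : Int) :
    ∀ (ps : List (Int × Char)) (n : PySem.Dict String (List (List Int)))
      (s : PySem.Dict String (List Int)) (c : List Int) (u : List Char),
    ps.foldl (afStep L) (n, s, c, u) =
      ((ps.foldl (numStep L) (n, c, u)).1, ps.foldl symStep s, (ps.foldl (numStep L) (n, c, u)).2) := by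
  intro ps
  induction ps with
  | nil => intro n s c u; rfl
  | cons p rest ih =>
    intro n s c u
    simp only [List.foldl_cons, afStep_split]
    obtain ⟨n', c', u'⟩ := numStep L (n, c, u) p
    exact ih n' (symStep s p) c' u'

theorem aAdd_eq_modify (d : PySem.Dict String (List (List Int))) (k : String) (v : List Int) :
    aAdd d k v = d.modify k [] (· ++ [v]) := by
  unfold aAdd
  cases h : d.get? k with
  | some l => rfl
  | none =>
    have hfind : d.items.find? (fun p => p.1 == k) = none := by
      simpa [PySem.Dict.get?] using h
    have hall : ∀ p ∈ d.items, ¬ (p.1 == k) = true := fun p hp => List.find?_eq_none.mp hfind p hp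
    have hc : d.contains k = false := by
      simp only [PySem.Dict.contains, List.any_eq_false]
      intro p hp; simpa using hall p hp
    rw [PySem.Dict.modify, PySem.Dict.modify, PySem.Dict.getD_insert_self]
    have hgd : d.getD k [] = [] := by simp [PySem.Dict.getD, h]
    rw [hgd]
    simp only [List.nil_append]
    apply PySem.Dict.ext
    simp only [PySem.Dict.insert, hc, if_false, Bool.false_eq_true]
    have hc2 : (PySem.Dict.mk (d.items ++ [(k, ([] : List (List Int)))])).contains k = true := by
      simp [PySem.Dict.contains]
    simp only [hc2, if_true]
    simp only [List.map_append]
    congr 1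
    · conv_rhs => rw [← List.map_id d.items]
      exact List.map_congr_left (fun p hp => by simp [hall p hp])
    · simp

theorem symStep_eq_bSymStep (d : PySem.Dict String (List Int)) (p : Int × Char) :
    symStep d p = bSymStep d p := by
  unfold symStep bSymStep
  split_ifs with hm
  · cases h : d.get? (String.ofList [p.2]) with
    | some l => rfl
    | none =>
      rw [PySem.Dict.modify]
      have hgd : d.getD (String.ofList [p.2]) [] = [] := by simp [PySem.Dict.getD, h]
      rw [hgd]
      simp
  · rfl

theorem foldl_symStep_eq (ps : List (Int × Char)) (d : PySem.Dict String (List Int)) :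
    ps.foldl symStep d = ps.foldl bSymStep d := by
  induction ps generalizing d with
  | nil => rfl
  | cons p rest ih => simp only [List.foldl_cons, symStep_eq_bSymStep]; exact ih _

theorem HL_cons (L : Int) (p : Int × Char) (rest : List (Int × Char)) (h : HL L (p :: rest))
    (hne : rest ≠ []) : p.1 ≠ L ∧ HL L rest := by
  cases rest with
  | nil => exact absurd rfl hne
  | cons q t => exact h

theorem HL_enumerate (s : List Char) (k : Int) :
    HL (k + s.length - 1) (PySem.List.enumerate s k) := by
  induction s generalizing k with
  | nil => simp [PySem.List.enumerate_nil, HL]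
  | cons c t ih =>
    cases t with
    | nil =>
      simp [PySem.List.enumerate_cons, PySem.List.enumerate_nil, HL]
    | cons c2 t2 =>
      have hL : k + ((c :: c2 :: t2).length : Int) - 1 = (k + 1) + ((c2 :: t2).length : Int) - 1 := by
        simp; omega
      rw [hL, PySem.List.enumerate_cons, PySem.List.enumerate_cons]
      refine ⟨?_, ?_⟩
      · simp; omega
      · rw [← PySem.List.enumerate_cons]; exact ih (k + 1)

theorem runA (L : Int) (rest' : List (Int × Char))
    (hrest : ∀ q t, rest' = q :: t → PySem.Chars.isdigit q.2 = false) :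
    ∀ (r : List (Int × Char)) (n : PySem.Dict String (List (List Int)))
      (coords : List Int) (cur : List Char),
    r ≠ [] → (∀ p ∈ r, PySem.Chars.isdigit p.2 = true) →
    HL L (r ++ rest') →
    ((r ++ rest').foldl (numStep L) (n, coords, cur)).1 =
      (rest'.foldl (numStep L)
        (aAdd n (String.ofList (cur ++ r.map Prod.snd)) (coords ++ r.map Prod.fst), [], [])).1 := by
  intro r
  induction r with
  | nil => intro n coords cur hne; exact absurd rfl hne
  | cons p r2 ih =>
    obtain ⟨i, c⟩ := p
    intro n coords cur _ hall hHL
    have hd : PySem.Chars.isdigit c = true := hall (i, c) (List.mem_cons_self)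
    cases hr2 : r2 with
    | nil =>
      cases hrest' : rest' with
      | nil =>
        subst hr2 hrest'
        have hiL : i = L := by simpa [HL] using hHL
        simp only [List.append_nil, List.foldl_cons, List.foldl_nil, numStep, hd, if_true, hiL,
          List.map_cons, List.map_nil]
        try simp
      | cons q t =>
        subst hr2 hrest'
        have hiL : i ≠ L := (HL_cons L (i, c) (q :: t) hHL (by simp)).1
        have hq : PySem.Chars.isdigit q.2 = false := hrest q t rfl
        simp only [List.nil_append, List.singleton_append, List.foldl_cons, numStep, hd, if_true,
          hiL, if_false, hq, List.map_cons, List.map_nil]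
        try simp [numStep, hq]
    | cons p2 r3 =>
      subst hr2
      have hne2 : (p2 :: r3) ++ rest' ≠ [] := by simp
      have hsplit := HL_cons L (i, c) ((p2 :: r3) ++ rest') (by simpa using hHL) hne2
      have key := ih n (coords ++ [i]) (cur ++ [c]) (by simp)
        (fun p hp => hall p (List.mem_cons_of_mem _ hp)) hsplit.2
      simp only [List.cons_append, List.foldl_cons, numStep, hd, if_true, hsplit.1, if_false]
      rw [List.cons_append] at key
      simpa [numStep] using key

theorem HL_append_right (L : Int) :
    ∀ (r rest : List (Int × Char)), HL L (r ++ rest) → rest ≠ [] → HL L rest := by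
  intro r
  induction r with
  | nil => intro rest h _; simpa using h
  | cons p r2 ih =>
    intro rest h hne
    have h2 : r2 ++ rest ≠ [] := by simp [hne]
    exact ih rest (HL_cons L p (r2 ++ rest) (by simpa using h) h2).2 hne

theorem mainNum (L : Int) :
    ∀ (ps : List (Int × Char)) (n : PySem.Dict String (List (List Int))),
    HL L ps → (ps.foldl (numStep L) (n, [], [])).1 = bNums n ps := by
  intro ps n
  induction n, ps using bNums.induct with
  | case1 n => intro _; rw [bNums]; rfl
  | case2 n i c rest hd run ih =>
    intro hHL
    rw [bNums]
    simp only [hd, if_true]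
    have hsplit : (i, c) :: rest =
        ((i, c) :: rest.takeWhile (fun q => PySem.Chars.isdigit q.2)) ++
          rest.dropWhile (fun q => PySem.Chars.isdigit q.2) := by
      simp [List.takeWhile_append_dropWhile]
    have hallr : ∀ p ∈ (i, c) :: rest.takeWhile (fun q => PySem.Chars.isdigit q.2),
        PySem.Chars.isdigit p.2 = true := by
      intro p hp
      rcases List.mem_cons.mp hp with h | h
      · subst h; exact hd
      · simpa using List.mem_takeWhile_imp h
    have hrestq : ∀ q t, rest.dropWhile (fun q => PySem.Chars.isdigit q.2) = q :: t →
        PySem.Chars.isdigit q.2 = false := by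
      intro q t hq
      have := List.head?_dropWhile_not (fun q => PySem.Chars.isdigit q.2) rest
      rw [hq] at this
      simpa using this
    have hHL' : HL L (((i, c) :: rest.takeWhile (fun q => PySem.Chars.isdigit q.2)) ++
        rest.dropWhile (fun q => PySem.Chars.isdigit q.2)) := by rw [← hsplit]; exact hHL
    have hstep := runA L (rest.dropWhile (fun q => PySem.Chars.isdigit q.2)) hrestq
      ((i, c) :: rest.takeWhile (fun q => PySem.Chars.isdigit q.2)) n [] [] (by simp) hallr hHL'
    rw [hsplit, hstep, aAdd_eq_modify]
    have hHLd : HL L (rest.dropWhile (fun q => PySem.Chars.isdigit q.2)) := by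
      cases hdw : rest.dropWhile (fun q => PySem.Chars.isdigit q.2) with
      | nil => trivial
      | cons q t =>
        exact HL_append_right L ((i, c) :: rest.takeWhile (fun q => PySem.Chars.isdigit q.2))
          (q :: t) (hdw ▸ hHL') (by simp)
    have := ih hHLd
    simpa [run] using this
  | case3 n i c rest hd ih =>
    intro hHL
    have hrest : HL L rest := by
      cases rest with
      | nil => trivial
      | cons q t => exact (HL_cons L (i, c) (q :: t) hHL (by simp)).2
    rw [bNums]
    simp only [hd, Bool.false_eq_true, if_false, List.foldl_cons, numStep, List.length_nil]
    simpa using ih hrest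

-- ===== VERDICT (by name: the statement is the Claim_ definition above) =====
theorem element_finder_spec : Claim_equal_element_finder := by
  intro line _
  unfold Spec_element_finder element_finder element_finder_alt
  simp only [foldl_afStep_split, PySem.List.len_eq]
  have hHL : HL (((PySem.Chars.strip line.toList).length : Int) - 1)
      (PySem.List.enumerate (PySem.Chars.strip line.toList) 0) := by
    simpa using HL_enumerate (PySem.Chars.strip line.toList) 0
  rw [mainNum _ _ _ hHL, foldl_symStep_eq]
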